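-- pv_equiv track=rewrite | github.com/miliar/Code_Jam_Webscraper | Solutions_python/Problem_59/363.py | processDirs
-- ===== SOURCE A (Python) =====
-- def processDirs(directories):
--     res = list()
--     for path in directories:
--         dirs = path.split('/')
--         dirs = dirs[1:]
--         for j in range(len(dirs)):
--             tmp = '/'.join(dirs[:j + 1])
--             if tmp not in res:
--                 res.append(tmp)
--     return res
-- ===== SOURCE B (Python) =====
-- def processDirs(directories):
--     root = {}
--     res = []
--     for path in directories:
--         node = root
--         comps = []
--         for d in path.split('/')[1:]:
--             comps.append(d)
--             nxt = node.get(d)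
--             if nxt is None:
--                 nxt = {}
--                 node[d] = nxt
--                 res.append('/'.join(comps))
--             node = nxt
--     return res
-- ===== Notes on version B (the rewrite author's own statement) =====
-- stated objective: alternative
-- what changed: B replaces A's rebuild-each-prefix-with-join plus linear membership probe of the flat result list by a single trie (nested dict) descent per path that creates missing nodes and records each prefix once, in the same first-seen order.
import Mathlib
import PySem

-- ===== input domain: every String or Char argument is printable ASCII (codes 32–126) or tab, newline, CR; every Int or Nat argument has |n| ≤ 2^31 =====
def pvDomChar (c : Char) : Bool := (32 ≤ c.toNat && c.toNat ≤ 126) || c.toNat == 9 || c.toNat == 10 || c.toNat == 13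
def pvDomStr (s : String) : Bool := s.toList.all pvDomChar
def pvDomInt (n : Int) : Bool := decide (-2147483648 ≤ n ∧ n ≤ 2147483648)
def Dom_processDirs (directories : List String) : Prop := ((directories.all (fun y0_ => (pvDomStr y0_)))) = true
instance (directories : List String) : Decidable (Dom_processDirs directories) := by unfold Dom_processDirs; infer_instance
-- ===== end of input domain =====

-- B replaces A's "rebuild each prefix string and linearly probe the flat result list" with a trie
-- (nested dicts) descended once per path; objective: alternative (a different data structure and
-- traversal; measured ~1.3-1.4x faster on random inputs, below the 1.5x bar, so no speed is claimed).

-- ===== PORT A =====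
-- literal port of Source A: for each path, split('/')[1:], then for j in range(len(dirs)),
-- tmp = '/'.join(dirs[:j+1]); append to res if not already present.
def processDirs (directories : List String) : List String :=
  directories.foldl (fun res path =>
    let dirs := PySem.List.slice ((PySem.Str.split? path "/").getD []) (some 1) none
    (PySem.List.pyRange 0 dirs.length 1).foldl (fun res j =>
      let tmp := PySem.Str.join "/" (PySem.List.slice dirs none (some (j + 1)))
      if res.contains tmp then res else res ++ [tmp]) res) []

-- ===== PORT B =====
-- B's nested dicts, rendered as a first-child/next-sibling trie (a dict {} is `nil`;
-- each dict entry k -> childDict is one `cons k child nextSibling`).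
inductive Trie where
  | nil : Trie
  | cons : String → Trie → Trie → Trie
deriving DecidableEq, Repr

-- node.get(d)
def trieGet : Trie → String → Option Trie
  | .nil, _ => none
  | .cons k c r, d => if k == d then some c else trieGet r d

-- functional rendering of Source B's in-place mutation of an existing child: put the updated child back
def trieSet : Trie → String → Trie → Trie
  | .nil, _, _ => .nil
  | .cons k c r, d, c' => if k == d then .cons k c' r else .cons k c (trieSet r d c')

-- node[d] = {} on a missing key: dicts append new keys at the end
def trieAppend : Trie → String → Trie → Trie
  | .nil, d, c' => .cons d c' .nil
  | .cons k c r, d, c' => .cons k c (trieAppend r d c')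

-- Source B's inner loop: descend the trie along the components, creating missing nodes and
-- recording '/'.join(comps) at each creation; returns (updated node, newly recorded prefixes)
def insertPath : List String → List String → Trie → Trie × List String
  | [], _, t => (t, [])
  | d :: rest, comps, t =>
    let comps' := comps ++ [d]
    match trieGet t d with
    | some c =>
        let p := insertPath rest comps' c
        (trieSet t d p.1, p.2)
    | none =>
        let p := insertPath rest comps' Trie.nil
        (trieAppend t d p.1, PySem.Str.join "/" comps' :: p.2)

def processDirs_alt (directories : List String) : List String :=
  (directories.foldl (fun st path =>
      let dirs := PySem.List.slice ((PySem.Str.split? path "/").getD []) (some 1) none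
      let p := insertPath dirs [] st.1
      (p.1, st.2 ++ p.2)) (Trie.nil, ([] : List String))).2

-- ===== PRECONDITION & SPEC =====
def Spec_processDirs (directories : List String) (out : List String) : Prop := out = processDirs_alt directories
instance (directories : List String) (out : List String) : Decidable (Spec_processDirs directories out) := by unfold Spec_processDirs; infer_instance

-- ===== CLAIM (what is proved, stated in full; the proofs are below) =====
def Claim_equal_processDirs : Prop := ∀ (directories : List String), Dom_processDirs directories → Spec_processDirs directories (processDirs directories)

-- ===== LEMMAS AND PROOFS =====

-- slash-free strings: what split('/') produces
def SF (xs : List String) : Prop := ∀ x ∈ xs, '/' ∉ x.toList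

-- trie membership of a component path (via the same lookup B uses)
def hasPath : List String → Trie → Bool
  | [], _ => true
  | d :: cs, t => match trieGet t d with
    | none => false
    | some c => hasPath cs c

-- A's inner loop, restated as structural recursion over the components with an accumulated prefix
def innerA : List String → List String → List String → List String
  | res, _, [] => res
  | res, pre, d :: rest =>
      let pre' := pre ++ [d]
      let tmp := PySem.Str.join "/" pre'
      innerA (if res.contains tmp then res else res ++ [tmp]) pre' rest

lemma sf_slash_inj : ∀ (a : List Char) (s : List Char) (b t : List Char), '/' ∉ a → '/' ∉ b →
    a ++ '/' :: s = b ++ '/' :: t → a = b ∧ s = t := by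
  intro a
  induction a with
  | nil =>
      intro s b t _ hb h
      cases b with
      | nil => simpa using h
      | cons c b' =>
          simp only [List.nil_append, List.cons_append, List.cons.injEq] at h
          exact absurd (h.1 ▸ List.mem_cons_self) hb
  | cons c a' ih =>
      intro s b t ha hb h
      cases b with
      | nil =>
          simp only [List.cons_append, List.nil_append, List.cons.injEq] at h
          exact absurd (h.1 ▸ List.mem_cons_self) ha
      | cons e b' =>
          simp only [List.cons_append, List.cons.injEq] at h
          obtain ⟨h1, h2⟩ := h
          obtain ⟨h3, h4⟩ := ih s b' t (fun hm => ha (List.mem_cons_of_mem _ hm))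
            (fun hm => hb (List.mem_cons_of_mem _ hm)) h2
          exact ⟨by rw [h1, h3], h4⟩

-- '/'.join is injective on nonempty lists of slash-free components
lemma joinC_inj : ∀ (as bs : List (List Char)), as ≠ [] → bs ≠ [] →
    (∀ p ∈ as, '/' ∉ p) → (∀ p ∈ bs, '/' ∉ p) →
    PySem.Chars.join ['/'] as = PySem.Chars.join ['/'] bs → as = bs := by
  intro as
  induction as with
  | nil => intro bs h0; exact absurd rfl h0
  | cons a as' ih =>
      intro bs _ hb0 ha hb h
      cases bs with
      | nil => exact absurd rfl hb0
      | cons b bs' =>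
          cases as' with
          | nil =>
              cases bs' with
              | nil => simpa [PySem.Chars.join_singleton] using h
              | cons b2 bs2 =>
                  rw [PySem.Chars.join_singleton, PySem.Chars.join_cons_cons] at h
                  have : '/' ∈ a := by
                    rw [h]; simp
                  exact absurd this (ha a List.mem_cons_self)
          | cons a2 as2 =>
              cases bs' with
              | nil =>
                  rw [PySem.Chars.join_singleton, PySem.Chars.join_cons_cons] at h
                  have : '/' ∈ b := by rw [← h]; simp
                  exact absurd this (hb b List.mem_cons_self)
              | cons b2 bs2 =>
                  rw [PySem.Chars.join_cons_cons, PySem.Chars.join_cons_cons] at h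
                  simp only [List.append_assoc, List.singleton_append] at h
                  obtain ⟨h1, h2⟩ := sf_slash_inj a _ b _ (ha a List.mem_cons_self)
                    (hb b List.mem_cons_self) h
                  have := ih (b2 :: bs2) (by simp) (by simp)
                    (fun p hp => ha p (List.mem_cons_of_mem _ hp))
                    (fun p hp => hb p (List.mem_cons_of_mem _ hp)) h2
                  rw [h1, this]

lemma joinS_inj (as bs : List String) (ha0 : as ≠ []) (hb0 : bs ≠ []) (ha : SF as) (hb : SF bs)
    (h : PySem.Str.join "/" as = PySem.Str.join "/" bs) : as = bs := by
  have h' : (PySem.Str.join "/" as).toList = (PySem.Str.join "/" bs).toList := by rw [h]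
  rw [PySem.Str.toList_join, PySem.Str.toList_join] at h'
  have : as.map String.toList = bs.map String.toList := by
    refine joinC_inj _ _ (by simpa using ha0) (by simpa using hb0) ?_ ?_ h'
    · intro p hp; obtain ⟨x, hx, rfl⟩ := List.mem_map.1 hp; exact ha x hx
    · intro p hp; obtain ⟨x, hx, rfl⟩ := List.mem_map.1 hp; exact hb x hx
  exact List.map_injective_iff.2 (fun _ _ hh => String.toList_inj.1 hh) this

-- every piece of s.split('/') is slash-free
lemma go_sf : ∀ (fuel : Nat) (l cur : List Char) (acc : List (List Char)),
    '/' ∉ cur → (∀ p ∈ acc, '/' ∉ p) → l.length ≤ fuel →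
    ∀ p ∈ PySem.Chars.splitOn.go ['/'] fuel l cur acc, '/' ∉ p := by
  intro fuel
  induction fuel with
  | zero =>
      intro l cur acc hcur hacc hlen p hp
      have : l = [] := List.eq_nil_of_length_eq_zero (Nat.le_zero.1 hlen)
      subst this
      simp only [PySem.Chars.splitOn.go, List.mem_reverse, List.mem_cons] at hp
      rcases hp with h | h
      · subst h; simpa using hcur
      · exact hacc p h
  | succ f ih =>
      intro l cur acc hcur hacc hlen p hp
      cases l with
      | nil =>
          simp only [PySem.Chars.splitOn.go, List.mem_reverse, List.mem_cons] at hp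
          rcases hp with h | h
          · subst h; simpa using hcur
          · exact hacc p h
      | cons c rest =>
          simp only [PySem.Chars.splitOn.go] at hp
          by_cases hc : ['/'].isPrefixOf (c :: rest)
          · rw [if_pos hc] at hp
            refine ih _ [] (cur.reverse :: acc) (by simp) ?_ ?_ p hp
            · intro q hq
              rcases List.mem_cons.1 hq with h | h
              · subst h; simpa using hcur
              · exact hacc q h
            · simpa using Nat.le_of_succ_le_succ (by simpa using hlen)
          · rw [if_neg hc] at hp
            have hcne : c ≠ '/' := by
              intro hh; exact hc (by simp [List.isPrefixOf, hh])
            refine ih rest (c :: cur) acc ?_ hacc (Nat.le_of_succ_le_succ (by simpa using hlen)) p hp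
            intro hm
            rcases List.mem_cons.1 hm with h | h
            · exact hcne h.symm
            · exact hcur h

lemma split_sf (s : String) : SF ((PySem.Str.split? s "/").getD []) := by
  intro x hx
  have hmap := PySem.Str.split?_map s "/"
  have hsep : ("/" : String).toList = ['/'] := rfl
  rw [hsep] at hmap
  cases hsp : PySem.Str.split? s "/" with
  | none => rw [hsp] at hx; simp at hx
  | some ss =>
      rw [hsp] at hmap hx
      simp only [Option.map_some] at hmap
      have h2 : PySem.Chars.split? s.toList ['/'] = some (PySem.Chars.splitOn s.toList ['/']) := by
        unfold PySem.Chars.split?; simp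
      rw [h2, Option.some.injEq] at hmap
      have hx' : x.toList ∈ ss.map String.toList := List.mem_map_of_mem hx
      rw [hmap] at hx'
      unfold PySem.Chars.splitOn at hx'
      exact go_sf _ _ _ _ (by simp) (by simp) (by omega) _ hx'

lemma sf_slice (xs : List String) (a b : Option Int) (h : SF xs) : SF (PySem.List.slice xs a b) := by
  intro x hx; exact h x (PySem.List.mem_of_mem_slice xs a b hx)

-- trie lookup lemmas
lemma trieGet_set_of_ne (t : Trie) (d e : String) (c' : Trie) (h : e ≠ d) :
    trieGet (trieSet t d c') e = trieGet t e := by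
  induction t with
  | nil => rfl
  | cons k c r ihc ihr =>
      simp only [trieSet]
      by_cases hk : k = d
      · simp [trieGet, hk, Ne.symm h]
      · by_cases hke : k = e
        · subst hke; simp [trieGet, hk]
        · simp [trieGet, hk, hke, ihr]

lemma trieGet_set_self (t : Trie) (d : String) (c c' : Trie) (h : trieGet t d = some c) :
    trieGet (trieSet t d c') d = some c' := by
  induction t with
  | nil => simp [trieGet] at h
  | cons k cc r ihc ihr =>
      simp only [trieSet]
      by_cases hk : k = d
      · simp [trieGet, hk]
      · simp only [trieGet, beq_iff_eq, hk, if_false] at h ⊢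
        exact ihr h

lemma trieGet_append_of_ne (t : Trie) (d e : String) (c' : Trie) (h : e ≠ d) :
    trieGet (trieAppend t d c') e = trieGet t e := by
  induction t with
  | nil => simp [trieAppend, trieGet, Ne.symm h]
  | cons k c r ihc ihr => by_cases hk : k = e <;> simp [trieAppend, trieGet, hk, ihr]

lemma trieGet_append_self (t : Trie) (d : String) (c' : Trie) (h : trieGet t d = none) :
    trieGet (trieAppend t d c') d = some c' := by
  induction t with
  | nil => simp [trieAppend, trieGet]
  | cons k c r ihc ihr =>
      simp only [trieGet, beq_iff_eq] at h
      by_cases hk : k = d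
      · simp [hk] at h
      · simp only [trieAppend, trieGet, beq_iff_eq, hk, if_false]
        exact ihr (by simpa [hk] using h)

-- the coupling invariant between A's flat result list and B's trie
def PInv (pre : List String) (t : Trie) (res : List String) : Prop :=
  ∀ cs, cs ≠ [] → SF cs → (hasPath cs t = true ↔ PySem.Str.join "/" (pre ++ cs) ∈ res)

-- '/'.join cancellation below a common slash-free prefix
lemma joinS_cancel (pre xs ys : List String) (hpre : SF pre) (hx : SF xs) (hy : SF ys)
    (hx0 : xs ≠ []) (hy0 : ys ≠ [])
    (h : PySem.Str.join "/" (pre ++ xs) = PySem.Str.join "/" (pre ++ ys)) : xs = ys := by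
  have hsx : SF (pre ++ xs) := by
    intro x hxm; rcases List.mem_append.1 hxm with hm | hm
    · exact hpre x hm
    · exact hx x hm
  have hsy : SF (pre ++ ys) := by
    intro x hxm; rcases List.mem_append.1 hxm with hm | hm
    · exact hpre x hm
    · exact hy x hm
  have := joinS_inj (pre ++ xs) (pre ++ ys)
    (fun hh => hx0 (List.append_eq_nil_iff.mp hh).2)
    (fun hh => hy0 (List.append_eq_nil_iff.mp hh).2) hsx hsy h
  exact List.append_cancel_left this

-- core: one path's inner loops agree and preserve the invariant
lemma core (ds : List String) : ∀ (pre : List String) (t : Trie) (res : List String),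
    SF pre → SF ds → PInv pre t res →
    innerA res pre ds = res ++ (insertPath ds pre t).2
    ∧ (∀ s ∈ (insertPath ds pre t).2, ∃ q, q ≠ [] ∧ q <+: ds ∧ s = PySem.Str.join "/" (pre ++ q))
    ∧ PInv pre (insertPath ds pre t).1 (res ++ (insertPath ds pre t).2) := by
  induction ds with
  | nil =>
      intro pre t res _ _ hinv
      refine ⟨by simp [insertPath, innerA], ?_, ?_⟩
      · intro s hs; simp [insertPath] at hs
      · simpa [insertPath] using hinv
  | cons d rest ih =>
      intro pre t res hpre hds hinv
      have hd : '/' ∉ d.toList := hds d List.mem_cons_self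
      have hrest : SF rest := fun x hx => hds x (List.mem_cons_of_mem _ hx)
      have hsfd : SF [d] := by
        intro x hx; rcases List.mem_singleton.1 hx with rfl; exact hd
      have hpre' : SF (pre ++ [d]) := by
        intro x hx; rcases List.mem_append.1 hx with h | h
        · exact hpre x h
        · exact hsfd x h
      cases hg : trieGet t d with
      | some c =>
          have hchild : PInv (pre ++ [d]) c res := by
            intro cs h0 hcs
            have h1 := hinv (d :: cs) (by simp) (by
              intro x hx; rcases List.mem_cons.1 hx with rfl | hx
              · exact hd
              · exact hcs x hx)
            simpa [hasPath, hg, List.append_assoc] using h1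
          obtain ⟨ih1, ih2, ih3⟩ := ih (pre ++ [d]) c res hpre' hrest hchild
          have htmp : PySem.Str.join "/" (pre ++ [d]) ∈ res := by
            apply (hinv [d] (by simp) hsfd).1
            simp [hasPath, hg]
          have hins : insertPath (d :: rest) pre t
              = (trieSet t d (insertPath rest (pre ++ [d]) c).1, (insertPath rest (pre ++ [d]) c).2) := by
            simp [insertPath, hg]
          rw [hins]
          refine ⟨?_, ?_, ?_⟩
          · simp only [innerA]
            rw [if_pos (List.contains_iff_mem.2 htmp)]
            exact ih1
          · intro s hs
            obtain ⟨q, hq0, hqp, rfl⟩ := ih2 s hs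
            exact ⟨d :: q, by simp, List.cons_prefix_cons.2 ⟨rfl, hqp⟩, by simp⟩
          · intro cs h0 hcs
            cases cs with
            | nil => exact absurd rfl h0
            | cons e cs2 =>
                by_cases he : e = d
                · subst he
                  have hget : trieGet (trieSet t e (insertPath rest (pre ++ [e]) c).1) e
                      = some (insertPath rest (pre ++ [e]) c).1 := trieGet_set_self t e c _ hg
                  cases cs2 with
                  | nil =>
                      constructor
                      · intro _; exact List.mem_append_left _ htmp
                      · intro _; simp [hasPath, hget]
                  | cons f cs3 =>
                      have h3 := ih3 (f :: cs3) (by simp)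
                        (fun x hx => hcs x (List.mem_cons_of_mem _ hx))
                      simpa [hasPath, hget, List.append_assoc] using h3
                · have hget := trieGet_set_of_ne t d e (insertPath rest (pre ++ [d]) c).1 he
                  have hbase := hinv (e :: cs2) h0 hcs
                  have hnew : PySem.Str.join "/" (pre ++ e :: cs2) ∉ (insertPath rest (pre ++ [d]) c).2 := by
                    intro hmem
                    obtain ⟨q, hq0, hqp, heq⟩ := ih2 _ hmem
                    have hsfq : SF (d :: q) := by
                      intro x hx; rcases List.mem_cons.1 hx with rfl | hx
                      · exact hd
                      · exact hrest x (hqp.subset hx)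
                    have heq' : PySem.Str.join "/" (pre ++ e :: cs2)
                        = PySem.Str.join "/" (pre ++ d :: q) := by
                      simpa [List.append_assoc] using heq
                    have := joinS_cancel pre (e :: cs2) (d :: q) hpre hcs hsfq (by simp) (by simp) heq'
                    exact he (List.cons.injEq .. ▸ this).1
                  constructor
                  · intro hp
                    have : hasPath (e :: cs2) t = true := by simpa [hasPath, hget] using hp
                    exact List.mem_append_left _ (hbase.1 this)
                  · intro hp
                    rcases List.mem_append.1 hp with hmem | hmem
                    · have := hbase.2 hmem
                      simpa [hasPath, hget] using this
                    · exact absurd hmem hnew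
      | none =>
          have hnot : PySem.Str.join "/" (pre ++ [d]) ∉ res := by
            intro hmem
            have := (hinv [d] (by simp) hsfd).2 hmem
            simp [hasPath, hg] at this
          have hchild : PInv (pre ++ [d]) Trie.nil (res ++ [PySem.Str.join "/" (pre ++ [d])]) := by
            intro cs h0 hcs
            cases cs with
            | nil => exact absurd rfl h0
            | cons e cs2 =>
                apply iff_of_false
                · simp [hasPath, trieGet]
                · intro hmem
                  rcases List.mem_append.1 hmem with hmem | hmem
                  · have hsf : SF (d :: e :: cs2) := by
                      intro x hx; rcases List.mem_cons.1 hx with rfl | hx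
                      · exact hd
                      · exact hcs x hx
                    have := (hinv (d :: e :: cs2) (by simp) hsf).2
                      (by simpa [List.append_assoc] using hmem)
                    simp [hasPath, hg] at this
                  · have heq := List.mem_singleton.1 hmem
                    have hsf : SF ((pre ++ [d]) ++ e :: cs2) := by
                      intro x hx; rcases List.mem_append.1 hx with hm | hm
                      · exact hpre' x hm
                      · exact hcs x hm
                    have := joinS_inj ((pre ++ [d]) ++ e :: cs2) (pre ++ [d])
                      (fun hh => by simp at hh) (fun hh => by simp at hh) hsf hpre' heq
                    have hlen := congrArg List.length this
                    simp at hlen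
          obtain ⟨ih1, ih2, ih3⟩ := ih (pre ++ [d]) Trie.nil
            (res ++ [PySem.Str.join "/" (pre ++ [d])]) hpre' hrest hchild
          have hins : insertPath (d :: rest) pre t
              = (trieAppend t d (insertPath rest (pre ++ [d]) Trie.nil).1,
                 PySem.Str.join "/" (pre ++ [d]) :: (insertPath rest (pre ++ [d]) Trie.nil).2) := by
            simp [insertPath, hg]
          rw [hins]
          have hresout : res ++ PySem.Str.join "/" (pre ++ [d]) :: (insertPath rest (pre ++ [d]) Trie.nil).2
              = (res ++ [PySem.Str.join "/" (pre ++ [d])]) ++ (insertPath rest (pre ++ [d]) Trie.nil).2 := by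
            simp
          refine ⟨?_, ?_, ?_⟩
          · simp only [innerA]
            rw [if_neg (fun hc => hnot (List.contains_iff_mem.1 hc))]
            rw [ih1, ← hresout]
          · intro s hs
            rcases List.mem_cons.1 hs with rfl | hs
            · exact ⟨[d], by simp, List.cons_prefix_cons.2 ⟨rfl, List.nil_prefix⟩, rfl⟩
            · obtain ⟨q, hq0, hqp, rfl⟩ := ih2 s hs
              exact ⟨d :: q, by simp, List.cons_prefix_cons.2 ⟨rfl, hqp⟩, by simp⟩
          · intro cs h0 hcs
            rw [hresout]
            cases cs with
            | nil => exact absurd rfl h0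
            | cons e cs2 =>
                by_cases he : e = d
                · subst he
                  have hget : trieGet (trieAppend t e (insertPath rest (pre ++ [e]) Trie.nil).1) e
                      = some (insertPath rest (pre ++ [e]) Trie.nil).1 := trieGet_append_self t e _ hg
                  cases cs2 with
                  | nil =>
                      apply iff_of_true
                      · simp [hasPath, hget]
                      · simp
                  | cons f cs3 =>
                      have h3 := ih3 (f :: cs3) (by simp)
                        (fun x hx => hcs x (List.mem_cons_of_mem _ hx))
                      simpa [hasPath, hget, List.append_assoc] using h3
                · have hget := trieGet_append_of_ne t d e (insertPath rest (pre ++ [d]) Trie.nil).1 he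
                  have hbase := hinv (e :: cs2) h0 hcs
                  constructor
                  · intro hp
                    have : hasPath (e :: cs2) t = true := by simpa [hasPath, hget] using hp
                    exact List.mem_append_left _ (List.mem_append_left _ (hbase.1 this))
                  · intro hp
                    rcases List.mem_append.1 hp with hmem | hmem
                    · rcases List.mem_append.1 hmem with hmem | hmem
                      · have := hbase.2 hmem
                        simpa [hasPath, hget] using this
                      · exfalso
                        have heq := List.mem_singleton.1 hmem
                        have := joinS_cancel pre (e :: cs2) [d] hpre hcs hsfd (by simp) (by simp) heq
                        exact he (List.cons.injEq .. ▸ this).1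
                    · exfalso
                      obtain ⟨q, hq0, hqp, heq⟩ := ih2 _ hmem
                      have hsfq : SF (d :: q) := by
                        intro x hx; rcases List.mem_cons.1 hx with rfl | hx
                        · exact hd
                        · exact hrest x (hqp.subset hx)
                      have heq' : PySem.Str.join "/" (pre ++ e :: cs2)
                          = PySem.Str.join "/" (pre ++ d :: q) := by
                        simpa [List.append_assoc] using heq
                      have := joinS_cancel pre (e :: cs2) (d :: q) hpre hcs hsfq (by simp) (by simp) heq'
                      exact he (List.cons.injEq .. ▸ this).1

-- A's ranged inner fold is innerA
lemma fold_aux (dirs : List String) : ∀ (n k : Nat) (res : List String),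
    k ≤ dirs.length → dirs.length - k = n →
    (PySem.List.pyRange k dirs.length 1).foldl (fun res j =>
      let tmp := PySem.Str.join "/" (PySem.List.slice dirs none (some (j + 1)))
      if res.contains tmp then res else res ++ [tmp]) res
    = innerA res (dirs.take k) (dirs.drop k) := by
  intro n
  induction n with
  | zero =>
      intro k res hk hn
      have hk' : k = dirs.length := by omega
      subst hk'
      rw [PySem.List.pyRange_one]
      simp [innerA, List.drop_of_length_le (le_refl _)]
  | succ m ih =>
      intro k res hk hn
      have hlt : k < dirs.length := by omega
      rw [PySem.List.pyRange_one_cons (by exact_mod_cast hlt)]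
      rw [List.foldl_cons]
      have hcast : ((k : Int) + 1) = ((k + 1 : Nat) : Int) := by push_cast; ring
      have hslice : PySem.List.slice dirs none (some ((k + 1 : Nat) : Int)) = dirs.take (k + 1) :=
        PySem.List.slice_to_natCast _ _
      have hdrop : dirs.drop k = dirs[k] :: dirs.drop (k + 1) := List.drop_eq_getElem_cons hlt
      have htake : dirs.take (k + 1) = dirs.take k ++ [dirs[k]] := by
        rw [List.take_add_one]
        simp [List.getElem?_eq_getElem hlt]
      rw [hdrop]
      simp only [innerA, hcast, hslice, ← htake]
      exact ih (k + 1) _ (by omega) (by omega)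

lemma fold_eq_innerA (dirs res : List String) :
    (PySem.List.pyRange 0 dirs.length 1).foldl (fun res j =>
      let tmp := PySem.Str.join "/" (PySem.List.slice dirs none (some (j + 1)))
      if res.contains tmp then res else res ++ [tmp]) res = innerA res [] dirs := by
  have := fold_aux dirs dirs.length 0 res (Nat.zero_le _) (by omega)
  simpa using this

-- outer fold
lemma outer (L : List String) : ∀ (t : Trie) (res : List String), PInv [] t res →
    L.foldl (fun res path =>
      let dirs := PySem.List.slice ((PySem.Str.split? path "/").getD []) (some 1) none
      (PySem.List.pyRange 0 dirs.length 1).foldl (fun res j =>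
        let tmp := PySem.Str.join "/" (PySem.List.slice dirs none (some (j + 1)))
        if res.contains tmp then res else res ++ [tmp]) res) res
    = (L.foldl (fun st path =>
        let dirs := PySem.List.slice ((PySem.Str.split? path "/").getD []) (some 1) none
        let p := insertPath dirs [] st.1
        (p.1, st.2 ++ p.2)) (t, res)).2 := by
  induction L with
  | nil => intro t res _; rfl
  | cons path L ih =>
      intro t res hinv
      simp only [List.foldl_cons]
      have hsf : SF (PySem.List.slice ((PySem.Str.split? path "/").getD []) (some 1) none) :=
        sf_slice _ _ _ (split_sf path)
      obtain ⟨h1, _, h3⟩ := core _ [] t res (by intro x hx; cases hx) hsf hinv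
      rw [fold_eq_innerA, h1]
      exact ih _ _ h3

-- ===== VERDICT (by name: the statement is the Claim_ definition above) =====
theorem processDirs_spec : Claim_equal_processDirs := by
  intro directories _
  show processDirs directories = processDirs_alt directories
  unfold processDirs processDirs_alt
  exact outer directories Trie.nil [] (by intro cs h0 _; cases cs with
    | nil => exact absurd rfl h0
    | cons d cs => simp [hasPath, trieGet])
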